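-- pv_equiv track=rewrite | github.com/AbeTai/AHC_030 | test/20240213_153653_log.py | extract_squares_coordinates_grouped
-- ===== SOURCE A (Python) =====
-- def extract_squares_coordinates_grouped(N, d):
--     squares = []
--     for i in range(0, N, d):
--         for j in range(0, N, d):
--             # 一辺dの正方形または余白にある長方形のすべての座標を含むリストを作成
--             square = []
--             for di in range(min(d, N - i)):
--                 for dj in range(min(d, N - j)):
--                     square.append((i + di, j + dj))
--             squares.append(square)
--     return squares
-- ===== SOURCE B (Python) =====
-- def extract_squares_coordinates_grouped(N, d):
--     # Flat row-major scan with indexed bucketing instead of block-major nested reconstruction.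
--     if d < 0 or N <= 0:
--         return []
--     nb = (N + d - 1) // d
--     squares = [[] for _ in range(nb * nb)]
--     for x in range(N):
--         base = (x // d) * nb
--         for y in range(N):
--             squares[base + y // d].append((x, y))
--     return squares
-- ===== Notes on version B (the rewrite author's own statement) =====
-- stated objective: alternative
-- what changed: Replaces A's block-major four-level nested loop reconstruction with a preallocated bucket table and a single flat row-major scan over all cells, routing each (x,y) to bucket (x//d)*nb + y//d.
-- outside the precondition, e.g. on extract_squares_coordinates_grouped(-3, -1): A returns [[], [], [], [], [], [], [], [], []], B returns []
import Mathlib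
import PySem

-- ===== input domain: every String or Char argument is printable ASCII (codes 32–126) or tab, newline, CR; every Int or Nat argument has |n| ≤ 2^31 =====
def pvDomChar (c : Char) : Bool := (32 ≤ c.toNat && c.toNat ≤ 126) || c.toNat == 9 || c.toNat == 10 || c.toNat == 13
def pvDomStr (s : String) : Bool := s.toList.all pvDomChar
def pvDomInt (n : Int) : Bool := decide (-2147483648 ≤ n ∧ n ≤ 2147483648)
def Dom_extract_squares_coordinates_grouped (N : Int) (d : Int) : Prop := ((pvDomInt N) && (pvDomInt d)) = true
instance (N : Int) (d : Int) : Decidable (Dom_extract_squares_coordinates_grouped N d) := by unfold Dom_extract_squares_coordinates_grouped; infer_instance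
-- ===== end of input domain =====

-- B replaces A's block-major nested reconstruction by a single row-major scan that buckets
-- each coordinate into its d×d block by index arithmetic (objective: alternative decomposition).


-- ===== PORT A =====
def extract_squares_coordinates_grouped (N : Int) (d : Int) : List (List (Int × Int)) :=
  (PySem.List.pyRange 0 N d).foldl (fun squares i =>
    (PySem.List.pyRange 0 N d).foldl (fun squares j =>
      let square : List (Int × Int) :=
        (PySem.List.pyRange 0 (min d (N - i)) 1).foldl (fun square di =>
          (PySem.List.pyRange 0 (min d (N - j)) 1).foldl (fun square dj =>
            square ++ [(i + di, j + dj)]) square) []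
      squares ++ [square]) squares) []

-- ===== PORT B =====
-- squares[k].append(v); in Source B the index k is provably a nonnegative in-range index, so .toNat is exact
def pvAppendAt (ls : List (List (Int × Int))) (k : Int) (v : Int × Int) : List (List (Int × Int)) :=
  ls.modify k.toNat (fun b => b ++ [v])

def extract_squares_coordinates_grouped_alt (N : Int) (d : Int) : List (List (Int × Int)) :=
  if d < 0 ∨ N ≤ 0 then []
  else
    let nb := PySem.Int.floordiv (N + d - 1) d
    let init : List (List (Int × Int)) := List.replicate (nb * nb).toNat []
    (PySem.List.pyRange 0 N 1).foldl (fun squares x =>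
      let base := PySem.Int.floordiv x d * nb
      (PySem.List.pyRange 0 N 1).foldl (fun squares y =>
        pvAppendAt squares (base + PySem.Int.floordiv y d) (x, y)) squares) init

-- ===== PRECONDITION & SPEC =====
-- Pre_ excludes d = 0, where the Python A raises ValueError (range step 0), and the out-of-domain
-- corner N < 0 ∧ d < 0 (a negative grid size), where A's negative-step range accidentally yields a
-- grid of empty blocks while B returns [].
def Pre_extract_squares_coordinates_grouped (N : Int) (d : Int) : Prop := d ≠ 0 ∧ (0 ≤ N ∨ 0 < d)
instance (N : Int) (d : Int) : Decidable (Pre_extract_squares_coordinates_grouped N d) := by unfold Pre_extract_squares_coordinates_grouped; infer_instance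

def pvWitness_extract_squares_coordinates_grouped : Int × Int := (5, 2)

def Spec_extract_squares_coordinates_grouped (N : Int) (d : Int) (out : List (List (Int × Int))) : Prop := out = extract_squares_coordinates_grouped_alt N d
instance (N : Int) (d : Int) (out : List (List (Int × Int))) : Decidable (Spec_extract_squares_coordinates_grouped N d out) := by unfold Spec_extract_squares_coordinates_grouped; infer_instance

-- ===== CLAIM (what is proved, stated in full; the proofs are below) =====
def Claim_equal_extract_squares_coordinates_grouped : Prop := ∀ (N : Int) (d : Int), Dom_extract_squares_coordinates_grouped N d → Pre_extract_squares_coordinates_grouped N d → Spec_extract_squares_coordinates_grouped N d (extract_squares_coordinates_grouped N d)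


-- ===== LEMMAS AND PROOFS =====

-- number of block rows/columns, ceil(N/d)
def pvNb (N d : Int) : Int := PySem.Int.floordiv (N + d - 1) d

-- one d×d (or clipped) block, as an interval product
def pvBlk (N d : Int) (bi bj : Nat) : List (Int × Int) :=
  (PySem.List.pyRange (d * bi) (min (d * bi + d) N) 1).flatMap (fun x =>
    (PySem.List.pyRange (d * bj) (min (d * bj + d) N) 1).map (fun y => (x, y)))

theorem pv_nb_facts (N d : Int) (hd : 0 < d) (hN : 0 < N) :
    0 < pvNb N d ∧ N ≤ pvNb N d * d ∧ (pvNb N d - 1) * d < N := by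
  have h := (PySem.Int.floordiv_eq_iff_of_pos (a := N + d - 1) (q := pvNb N d) hd).mp rfl
  obtain ⟨h1, h2⟩ := h
  have e2 : (pvNb N d + 1) * d = pvNb N d * d + d := by ring
  have e3 : (pvNb N d - 1) * d = pvNb N d * d - d := by ring
  have hNle : N ≤ pvNb N d * d := by omega
  refine ⟨?_, hNle, by omega⟩
  nlinarith

theorem pv_fd_eq_iff (d x c : Int) (hd : 0 < d) :
    PySem.Int.floordiv x d = c ↔ c * d ≤ x ∧ x < (c + 1) * d :=
  PySem.Int.floordiv_eq_iff_of_pos hd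

theorem pv_fd_bounds (N d x : Int) (hd : 0 < d) (hN : 0 < N) (hx0 : 0 ≤ x) (hxN : x < N) :
    0 ≤ PySem.Int.floordiv x d ∧ PySem.Int.floordiv x d < pvNb N d := by
  have h := (PySem.Int.floordiv_eq_iff_of_pos (a := x) (q := PySem.Int.floordiv x d) hd).mp rfl
  obtain ⟨h1, h2⟩ := h
  obtain ⟨hnb0, hnb1, hnb2⟩ := pv_nb_facts N d hd hN
  constructor
  · by_contra hneg
    have hle : PySem.Int.floordiv x d + 1 ≤ 0 := by omega
    have : (PySem.Int.floordiv x d + 1) * d ≤ 0 * d :=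
      mul_le_mul_of_nonneg_right hle (le_of_lt hd)
    simp at this; omega
  · by_contra hge
    have hle : pvNb N d ≤ PySem.Int.floordiv x d := by omega
    have : pvNb N d * d ≤ PySem.Int.floordiv x d * d :=
      mul_le_mul_of_nonneg_right hle (le_of_lt hd)
    omega

-- unique base-nb digits: the bucket index equals bi*nb+bj exactly on block (bi,bj)
theorem pv_digit_beq (a b q : Int) (bi bj : Nat)
    (ha : 0 ≤ a) (ha' : a < q) (hb : 0 ≤ b) (hb' : b < q)
    (_hbi : (bi : Int) < q) (hbj : (bj : Int) < q) :
    ((a * q + b).toNat == bi * q.toNat + bj) = (decide (a = (bi : Int)) && decide (b = (bj : Int))) := by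
  have hq0 : 0 ≤ q := by omega
  rw [Bool.eq_iff_iff]
  simp only [beq_iff_eq, Bool.and_eq_true, decide_eq_true_eq]
  have hcast : ((bi * q.toNat + bj : Nat) : Int) = (bi : Int) * q + (bj : Int) := by
    push_cast [Int.toNat_of_nonneg hq0]; ring
  have hnn : 0 ≤ a * q + b := by positivity
  constructor
  · intro h
    have hint : a * q + b = (bi : Int) * q + (bj : Int) := by
      rw [← hcast, ← h, Int.toNat_of_nonneg hnn]
    have hbi0 : (0 : Int) ≤ bi := by positivity
    have hbj0 : (0 : Int) ≤ bj := by positivity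
    have habi : a = (bi : Int) := by nlinarith [hint]
    exact ⟨habi, by nlinarith [hint]⟩
  · rintro ⟨h1, h2⟩
    subst h1; subst h2
    omega

theorem pv_pyRange_shift (lo m : Int) :
    PySem.List.pyRange lo (lo + m) 1 = (PySem.List.pyRange 0 m 1).map (fun t => lo + t) := by
  rw [PySem.List.pyRange_one, PySem.List.pyRange_one]
  simp [List.map_map, Function.comp_def]

-- A's inner two loops over offsets are the block interval product
theorem pv_sq_shift (N d i j : Int) :
    (PySem.List.pyRange 0 (min d (N - i)) 1).flatMap (fun di =>
      (PySem.List.pyRange 0 (min d (N - j)) 1).map (fun dj => (i + di, j + dj)))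
    = (PySem.List.pyRange i (min (i + d) N) 1).flatMap (fun x =>
        (PySem.List.pyRange j (min (j + d) N) 1).map (fun y => (x, y))) := by
  have hi : min (i + d) N = i + min d (N - i) := by omega
  have hj : min (j + d) N = j + min d (N - j) := by omega
  rw [hi, hj, pv_pyRange_shift i, pv_pyRange_shift j, List.flatMap_map]
  simp [List.map_map, Function.comp_def]

-- fold of appends at computed buckets, characterised bucket-by-bucket
theorem pv_buckets (ps : List (Int × Int)) (d nbI : Int) (ls : List (List (Int × Int))) (t : Nat) :
    (ps.foldl (fun squares p =>
        pvAppendAt squares (PySem.Int.floordiv p.1 d * nbI + PySem.Int.floordiv p.2 d) p) ls)[t]?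
      = ls[t]?.map (fun b => b ++ ps.filter (fun p =>
          (PySem.Int.floordiv p.1 d * nbI + PySem.Int.floordiv p.2 d).toNat == t)) := by
  induction ps generalizing ls with
  | nil => simp
  | cons p ps ih =>
      rw [List.foldl_cons, ih]
      unfold pvAppendAt
      rw [List.getElem?_modify]
      by_cases hp : (PySem.Int.floordiv p.1 d * nbI + PySem.Int.floordiv p.2 d).toNat = t
      · simp only [List.filter_cons, beq_iff_eq, hp]
        cases ls[t]? <;> simp
      · simp only [List.filter_cons, beq_iff_eq, if_neg hp]
        cases ls[t]? <;> simp

-- row-major double loop = fold over the flattened pair list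
theorem pv_double_foldl (xs ys : List Int) (d nbI : Int) (init : List (List (Int × Int))) :
    xs.foldl (fun squares x =>
      ys.foldl (fun squares y =>
        pvAppendAt squares (PySem.Int.floordiv x d * nbI + PySem.Int.floordiv y d) (x, y)) squares) init
    = (xs.flatMap (fun x => ys.map (fun y => (x, y)))).foldl (fun squares p =>
        pvAppendAt squares (PySem.Int.floordiv p.1 d * nbI + PySem.Int.floordiv p.2 d) p) init := by
  rw [List.foldl_flatMap]
  simp [List.foldl_map]

-- flattening an n×m grid of blocks, re-indexed by t ↦ (t / m, t % m)
theorem pv_flat_grid {γ : Type} (n m : Nat) (F : Nat → Nat → γ) :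
    (List.range n).flatMap (fun i => (List.range m).map (F i))
      = (List.range (n * m)).map (fun t => F (t / m) (t % m)) := by
  rcases Nat.eq_zero_or_pos m with hm | hm
  · subst hm; simp
  induction n with
  | zero => simp
  | succ n ih =>
      rw [List.range_succ, List.flatMap_append, ih, Nat.succ_mul, List.range_add, List.map_append]
      congr 1
      simp only [List.flatMap_cons, List.flatMap_nil, List.append_nil, List.map_map]
      refine List.map_congr_left (fun j hj => ?_)
      rw [List.mem_range] at hj
      have e : n * m + j = j + m * n := by ring
      have h1 : (n * m + j) / m = n := by
        rw [e, Nat.add_mul_div_left _ _ hm, Nat.div_eq_of_lt hj, Nat.zero_add]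
      have h2 : (n * m + j) % m = j := by
        rw [e, Nat.add_mul_mod_self_left, Nat.mod_eq_of_lt hj]
      simp [Function.comp, h1, h2]

-- congruence for flatMap over members
theorem pv_flatMap_congr {γ : Type} (l : List Int) (f g : Int → List γ)
    (h : ∀ x ∈ l, f x = g x) : l.flatMap f = l.flatMap g := by
  induction l with
  | nil => rfl
  | cons x xs ih =>
      simp only [List.flatMap_cons, h x (by simp), ih (fun y hy => h y (by simp [hy]))]

theorem pv_flatMap_if {γ : Type} (l : List Int) (p : Int → Bool) (G : Int → List γ) :
    l.flatMap (fun x => if p x then G x else []) = (l.filter p).flatMap G := by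
  induction l with
  | nil => rfl
  | cons x xs ih =>
      rw [List.flatMap_cons, List.filter_cons]
      by_cases hx : p x <;> simp [hx, ih]

-- the rows/columns whose floordiv is c form exactly the c-th block interval
theorem pv_filter_interval (N d : Int) (hd : 0 < d) (hN : 0 < N) (c : Nat)
    (hc : (c : Int) < pvNb N d) :
    (PySem.List.pyRange 0 N 1).filter (fun v => decide (PySem.Int.floordiv v d = (c : Int)))
      = PySem.List.pyRange (d * c) (min (d * c + d) N) 1 := by
  obtain ⟨hnb0, hnb1, hnb2⟩ := pv_nb_facts N d hd hN
  have hc0 : (0 : Int) ≤ c := by positivity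
  have hlo0 : 0 ≤ d * c := by positivity
  have hloN : d * c < N := by
    have : (c : Int) ≤ pvNb N d - 1 := by omega
    have h2 : d * (c : Int) ≤ d * (pvNb N d - 1) := by
      apply mul_le_mul_of_nonneg_left this (le_of_lt hd)
    have h3 : d * (pvNb N d - 1) = (pvNb N d - 1) * d := by ring
    omega
  have hsplit1 : PySem.List.pyRange 0 N 1
      = PySem.List.pyRange 0 (d * c) 1 ++ PySem.List.pyRange (d * c) N 1 :=
    PySem.List.pyRange_one_append _ _ _ hlo0 (le_of_lt hloN)
  have hsplit2 : PySem.List.pyRange (d * c) N 1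
      = PySem.List.pyRange (d * c) (min (d * c + d) N) 1
        ++ PySem.List.pyRange (min (d * c + d) N) N 1 :=
    PySem.List.pyRange_one_append _ _ _ (by omega) (by omega)
  rw [hsplit1, hsplit2, List.filter_append, List.filter_append]
  have hfd : ∀ v : Int, (PySem.Int.floordiv v d = (c : Int)) ↔ ((c : Int) * d ≤ v ∧ v < ((c : Int) + 1) * d) :=
    fun v => pv_fd_eq_iff d v c hd
  have h1 : (PySem.List.pyRange 0 (d * c) 1).filter (fun v => decide (PySem.Int.floordiv v d = (c : Int))) = [] := by
    rw [List.filter_eq_nil_iff]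
    intro v hv
    rw [PySem.List.mem_pyRange_one] at hv
    simp only [decide_eq_true_eq, hfd]
    intro ⟨hl, _⟩
    have : (c : Int) * d = d * c := by ring
    omega
  have h2 : (PySem.List.pyRange (d * c) (min (d * c + d) N) 1).filter
      (fun v => decide (PySem.Int.floordiv v d = (c : Int)))
      = PySem.List.pyRange (d * c) (min (d * c + d) N) 1 := by
    rw [List.filter_eq_self]
    intro v hv
    rw [PySem.List.mem_pyRange_one] at hv
    simp only [decide_eq_true_eq, hfd]
    have e1 : (c : Int) * d = d * c := by ring
    have e2 : ((c : Int) + 1) * d = d * c + d := by ring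
    omega
  have h3 : (PySem.List.pyRange (min (d * c + d) N) N 1).filter
      (fun v => decide (PySem.Int.floordiv v d = (c : Int))) = [] := by
    rw [List.filter_eq_nil_iff]
    intro v hv
    rw [PySem.List.mem_pyRange_one] at hv
    simp only [decide_eq_true_eq, hfd]
    intro ⟨_, hr⟩
    have e2 : ((c : Int) + 1) * d = d * c + d := by ring
    omega
  rw [h1, h2, h3]
  simp

-- the bucket routed to (bi,bj) collects exactly the block (bi,bj), in row-major order
theorem pv_block (N d : Int) (hd : 0 < d) (hN : 0 < N) (bi bj : Nat)
    (hbi : (bi : Int) < pvNb N d) (hbj : (bj : Int) < pvNb N d) :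
    ((PySem.List.pyRange 0 N 1).flatMap (fun x =>
        (PySem.List.pyRange 0 N 1).map (fun y => (x, y)))).filter (fun p =>
          (PySem.Int.floordiv p.1 d * pvNb N d + PySem.Int.floordiv p.2 d).toNat
            == bi * (pvNb N d).toNat + bj)
      = pvBlk N d bi bj := by
  obtain ⟨hnb0, hnb1, hnb2⟩ := pv_nb_facts N d hd hN
  rw [List.filter_flatMap]
  have step1 : ∀ x ∈ PySem.List.pyRange 0 N 1,
      ((PySem.List.pyRange 0 N 1).map (fun y => (x, y))).filter (fun p =>
          (PySem.Int.floordiv p.1 d * pvNb N d + PySem.Int.floordiv p.2 d).toNat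
            == bi * (pvNb N d).toNat + bj)
        = (if decide (PySem.Int.floordiv x d = (bi : Int))
            then (PySem.List.pyRange (d * bj) (min (d * bj + d) N) 1).map (fun y => (x, y))
            else []) := by
    intro x hx
    rw [PySem.List.mem_pyRange_one] at hx
    obtain ⟨hfx0, hfx1⟩ := pv_fd_bounds N d x hd hN hx.1 hx.2
    rw [List.filter_map]
    have hcong : ∀ y ∈ PySem.List.pyRange 0 N 1,
        ((fun p => (PySem.Int.floordiv p.1 d * pvNb N d + PySem.Int.floordiv p.2 d).toNat
            == bi * (pvNb N d).toNat + bj) ∘ (fun y => (x, y))) y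
          = (decide (PySem.Int.floordiv x d = (bi : Int))
              && decide (PySem.Int.floordiv y d = (bj : Int))) := by
      intro y hy
      rw [PySem.List.mem_pyRange_one] at hy
      obtain ⟨hfy0, hfy1⟩ := pv_fd_bounds N d y hd hN hy.1 hy.2
      exact pv_digit_beq _ _ _ bi bj hfx0 hfx1 hfy0 hfy1 hbi hbj
    rw [List.filter_congr hcong]
    by_cases hx' : PySem.Int.floordiv x d = (bi : Int)
    · simp only [hx', decide_true, Bool.true_and, if_true]
      rw [pv_filter_interval N d hd hN bj hbj]
    · simp [hx']
  rw [pv_flatMap_congr _ _ _ step1, pv_flatMap_if, pv_filter_interval N d hd hN bi hbi]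
  rfl

-- main equivalence on the nondegenerate case
theorem pv_main (N d : Int) (hd : 0 < d) (hN : 0 < N) :
    extract_squares_coordinates_grouped N d = extract_squares_coordinates_grouped_alt N d := by
  obtain ⟨hnb0, hnb1, hnb2⟩ := pv_nb_facts N d hd hN
  have hnbtn : (0:Int) < pvNb N d := hnb0
  set nb : Nat := (pvNb N d).toNat with hnbdef
  have hnbpos : 0 < nb := by omega
  -- the outer range of A enumerates the nb block starts
  have hRb : PySem.List.pyRange 0 N d = List.map (fun k : Nat => d * (k : Int)) (List.range nb) := by
    rw [PySem.List.pyRange_of_pos _ _ hd, if_pos (by omega : (0:Int) < N)]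
    have hcnt : ((N - 0 + d - 1) / d).toNat = nb := by
      have : (N - 0 + d - 1) = N + d - 1 := by ring
      rw [this, ← PySem.Int.floordiv_eq_ediv_of_pos hd]
      rfl
    rw [hcnt]
    exact List.map_congr_left (fun k _ => by ring)
  -- A in closed block-major form
  have hA : extract_squares_coordinates_grouped N d
      = (List.range (nb * nb)).map (fun t => pvBlk N d (t / nb) (t % nb)) := by
    unfold extract_squares_coordinates_grouped
    simp only [PySem.List.foldl_append_singleton_eq_map, PySem.List.foldl_append_eq_flatMap,
      List.nil_append]
    rw [hRb, List.flatMap_map]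
    simp only [List.map_map, Function.comp_def]
    rw [pv_flat_grid]
    refine List.map_congr_left (fun t ht => ?_)
    rw [List.mem_range] at ht
    rw [pv_sq_shift]
    rfl
  -- B in bucket form, read off bucket by bucket
  have hguard : ¬ (d < 0 ∨ N ≤ 0) := by omega
  have hB : extract_squares_coordinates_grouped_alt N d
      = (PySem.List.pyRange 0 N 1).foldl (fun squares x =>
          (PySem.List.pyRange 0 N 1).foldl (fun squares y =>
            pvAppendAt squares (PySem.Int.floordiv x d * pvNb N d + PySem.Int.floordiv y d) (x, y)) squares)
          (List.replicate (pvNb N d * pvNb N d).toNat []) := by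
    simp only [extract_squares_coordinates_grouped_alt, if_neg hguard]
    rfl
  have hrep : (pvNb N d * pvNb N d).toNat = nb * nb := by
    rw [Int.toNat_mul]
    all_goals omega
  rw [hA, hB, pv_double_foldl, hrep]
  refine List.ext_getElem? (fun t => ?_)
  rw [pv_buckets, List.getElem?_replicate]
  by_cases ht : t < nb * nb
  · rw [List.getElem?_map, List.getElem?_range ht, if_pos ht]
    simp only [Option.map_some]
    have hbi : t / nb < nb := by
      rw [Nat.div_lt_iff_lt_mul hnbpos]
      omega
    have hbj : t % nb < nb := Nat.mod_lt _ hnbpos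
    have hsplit : t = t / nb * nb + t % nb := by
      rw [Nat.mul_comm]
      exact (Nat.div_add_mod t nb).symm
    conv_rhs => rw [hsplit]
    rw [pv_block N d hd hN (t / nb) (t % nb) (by omega) (by omega)]
    simp
  · rw [if_neg ht, List.getElem?_eq_none (by simpa using ht), Option.map_none]

-- ===== VERDICT (by name: the statement is the Claim_ definition above) =====
theorem extract_squares_coordinates_grouped_spec : Claim_equal_extract_squares_coordinates_grouped := by
  intro N d _ hpre
  unfold Spec_extract_squares_coordinates_grouped
  rcases lt_trichotomy d 0 with hd | hd | hd
  · -- d < 0 (so 0 ≤ N by Pre_): both sides empty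
    obtain ⟨_, hN⟩ := hpre
    have hN' : 0 ≤ N := by omega
    unfold extract_squares_coordinates_grouped extract_squares_coordinates_grouped_alt
    rw [if_pos (Or.inl hd)]
    have h1 : ¬ d = 0 := by omega
    have h2 : ¬ 0 < d := by omega
    have h3 : ¬ N < 0 := by omega
    simp [PySem.List.pyRange, h1, h2, h3]
  · exact absurd hd hpre.1
  · rcases le_or_gt N 0 with hN | hN
    · unfold extract_squares_coordinates_grouped extract_squares_coordinates_grouped_alt
      rw [if_pos (Or.inr hN)]
      have h1 : ¬ d = 0 := by omega
      have h2 : ¬ (0:Int) < N := by omega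
      simp [PySem.List.pyRange, h1, h2, hd]
    · exact pv_main N d hd hN
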